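-- pv_equiv track=rewrite | github.com/MrBrantCode/unitest_baseline | mut_generate/mist_train_cf/cf_81471/solution.py | sum_elements_fibonacci
-- ===== SOURCE A (Python) =====
-- def sum_elements_fibonacci(a):
--     fib_list = [0, 1]
--     while fib_list[-1] < a:
--         fib_list.append(fib_list[-1] + fib_list[-2])
--
--     for i in range(len(fib_list)-2):
--         if fib_list[i] + fib_list[i+1] + fib_list[i+2] == a:
--             return True
--     return False
-- ===== SOURCE B (Python) =====
-- def sum_elements_fibonacci(a):
--     # sum of 3 consecutive Fibonacci numbers f(i)+f(i+1)+f(i+2) = 2*f(i+2),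
--     # so a qualifies iff a is positive, even, and a//2 is a Fibonacci number >= 1.
--     if a <= 0 or a % 2 != 0:
--         return False
--     t = a // 2
--     x, y = 0, 1
--     while y < t:
--         x, y = y, x + y
--     return y == t
-- ===== Notes on version B (the rewrite author's own statement) =====
-- stated objective: simpler
-- what changed: B drops A's explicit Fibonacci list and triple scan: since fib(i)+fib(i+1)+fib(i+2)=2*fib(i+2), B answers False unless a is positive and even, and otherwise checks with one two-variable loop whether a//2 is a Fibonacci number >= 1.
import Mathlib
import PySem

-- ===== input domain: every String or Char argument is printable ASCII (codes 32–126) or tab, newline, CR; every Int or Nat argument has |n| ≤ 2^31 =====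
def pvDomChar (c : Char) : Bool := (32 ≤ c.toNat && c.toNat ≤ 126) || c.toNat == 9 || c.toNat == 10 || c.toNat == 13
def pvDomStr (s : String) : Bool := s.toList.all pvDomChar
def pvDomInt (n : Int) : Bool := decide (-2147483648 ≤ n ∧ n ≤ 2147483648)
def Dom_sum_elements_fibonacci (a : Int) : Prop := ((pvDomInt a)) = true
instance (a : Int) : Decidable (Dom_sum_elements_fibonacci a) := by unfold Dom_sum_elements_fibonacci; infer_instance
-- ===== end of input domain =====

-- B replaces A's Fibonacci list + triple scan with a positive/even guard and a
-- two-variable Fibonacci loop testing whether a//2 is a Fibonacci number (simpler; same cost).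

-- ===== PORT A =====
-- while loop of A; the list's last two elements fib_list[-2], fib_list[-1] are carried
-- as the loop state (x, y) (they are Fibonacci numbers, hence Nat); the proof arguments
-- 1 ≤ y, x ≤ y only justify termination.
def fibBuild (a : Int) (l : List Int) (x y : Nat) (hy : 1 ≤ y) (hxy : x ≤ y) : List Int :=
  if h : (y : Int) < a then
    fibBuild a (l ++ [((x + y : Nat) : Int)]) y (x + y) (by omega) (by omega)
  else l
  termination_by (2 * a - x - y).toNat
  decreasing_by omega

-- the 'for i in range(len(fib_list)-2)' scan with early return, as a sliding window
def checkTriples (a : Int) : List Int → Bool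
  | x :: y :: z :: r => if x + y + z = a then true else checkTriples a (y :: z :: r)
  | _ => false

def sum_elements_fibonacci (a : Int) : Bool :=
  checkTriples a (fibBuild a [0, 1] 0 1 (by omega) (by omega))

-- ===== PORT B =====
-- 'while y < t: x, y = y, x + y'; returns the final y
def fibSearch (t : Int) (x y : Nat) (hy : 1 ≤ y) (hxy : x ≤ y) : Nat :=
  if h : (y : Int) < t then fibSearch t y (x + y) (by omega) (by omega) else y
  termination_by (2 * t - x - y).toNat
  decreasing_by omega

def sum_elements_fibonacci_alt (a : Int) : Bool :=
  if a ≤ 0 || PySem.Int.mod a 2 != 0 then false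
  else ((fibSearch (PySem.Int.floordiv a 2) 0 1 (by omega) (by omega) : Int) == PySem.Int.floordiv a 2)

-- ===== PRECONDITION & SPEC =====
def Spec_sum_elements_fibonacci (a : Int) (out : Bool) : Prop := out = sum_elements_fibonacci_alt a
instance (a : Int) (out : Bool) : Decidable (Spec_sum_elements_fibonacci a out) := by unfold Spec_sum_elements_fibonacci; infer_instance

-- ===== CLAIM (what is proved, stated in full; the proofs are below) =====
def Claim_equal_sum_elements_fibonacci : Prop := ∀ (a : Int), Dom_sum_elements_fibonacci a → Spec_sum_elements_fibonacci a (sum_elements_fibonacci a)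

-- ===== LEMMAS AND PROOFS =====

-- one controlled unfolding of fibBuild
theorem fibBuild_step (a : Int) (l : List Int) (x y : Nat) (hy : 1 ≤ y) (hxy : x ≤ y) :
    fibBuild a l x y hy hxy
      = if _h : (y : Int) < a then
          fibBuild a (l ++ [((x + y : Nat) : Int)]) y (x + y) (by omega) (by omega)
        else l := by
  rw [fibBuild]

-- fibBuild only appends: the accumulator splits off
theorem fibBuild_append (n : Nat) (a : Int) (x y : Nat) (hy : 1 ≤ y) (hxy : x ≤ y)
    (l : List Int) (hn : (2 * a - x - y).toNat ≤ n) :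
    fibBuild a l x y hy hxy = l ++ fibBuild a [] x y hy hxy := by
  induction n generalizing x y l with
  | zero =>
      have h : ¬ ((y : Int) < a) := by omega
      rw [fibBuild_step a l x y, fibBuild_step a [] x y]
      simp [h]
  | succ n ih =>
      by_cases h : (y : Int) < a
      · rw [fibBuild_step a l x y, fibBuild_step a [] x y]
        simp only [h, dite_true]
        rw [ih y (x + y) (by omega) (by omega) (l ++ [((x + y : Nat) : Int)]) (by omega),
            ih y (x + y) (by omega) (by omega) ([] ++ [((x + y : Nat) : Int)]) (by omega)]
        simp
      · rw [fibBuild_step a l x y, fibBuild_step a [] x y]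
        simp [h]

-- once the window has passed the target t (t < v), no later triple can sum to 2*t
theorem checkTriples_past (n : Nat) (u v : Nat) (hv : 1 ≤ v) (huv : u ≤ v) (a t : Int)
    (ha : a = 2 * t) (hlt : t < (v : Int)) (hn : (2 * a - u - v).toNat ≤ n) :
    checkTriples a ((u : Int) :: (v : Int) :: fibBuild a [] u v hv huv) = false := by
  induction n generalizing u v with
  | zero =>
      have h : ¬ ((v : Int) < a) := by omega
      rw [fibBuild_step a [] u v]
      simp [checkTriples, h]
  | succ n ih =>
      by_cases h : (v : Int) < a
      · rw [fibBuild_step a [] u v]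
        simp only [h, dite_true]
        rw [fibBuild_append n a v (u + v) (by omega) (by omega) _ (by omega)]
        simp only [List.nil_append, List.singleton_append]
        rw [checkTriples]
        have hne : ¬ ((u : Int) + (v : Int) + ((u + v : Nat) : Int) = a) := by
          push_cast; omega
        simp only [hne, if_false]
        exact ih v (u + v) (by omega) (by omega) (by push_cast; omega) (by omega)
      · rw [fibBuild_step a [] u v]
        simp [checkTriples, h]

-- for odd a no triple ever matches (every triple sum is even)
theorem checkTriples_odd (n : Nat) (x y : Nat) (hy : 1 ≤ y) (hxy : x ≤ y) (a : Int)
    (ha : a % 2 = 1) (hn : (2 * a - x - y).toNat ≤ n) :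
    checkTriples a ((x : Int) :: (y : Int) :: fibBuild a [] x y hy hxy) = false := by
  induction n generalizing x y with
  | zero =>
      have h : ¬ ((y : Int) < a) := by omega
      rw [fibBuild_step a [] x y]
      simp [checkTriples, h]
  | succ n ih =>
      by_cases h : (y : Int) < a
      · rw [fibBuild_step a [] x y]
        simp only [h, dite_true]
        rw [fibBuild_append n a y (x + y) (by omega) (by omega) _ (by omega)]
        simp only [List.nil_append, List.singleton_append]
        rw [checkTriples]
        have hne : ¬ ((x : Int) + (y : Int) + ((x + y : Nat) : Int) = a) := by
          push_cast; omega
        simp only [hne, if_false]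
        exact ih y (x + y) (by omega) (by omega) (by omega)
      · rw [fibBuild_step a [] x y]
        simp [checkTriples, h]

-- one controlled unfolding of fibSearch
theorem fibSearch_step (t : Int) (x y : Nat) (hy : 1 ≤ y) (hxy : x ≤ y) :
    fibSearch t x y hy hxy
      = if _h : (y : Int) < t then fibSearch t y (x + y) (by omega) (by omega) else y := by
  rw [fibSearch]

-- main coupling: from a state that has not yet passed t, A's triple scan on the rest of
-- the list answers exactly "the first Fibonacci value ≥ t equals t"
theorem main_lemma (n : Nat) (x y : Nat) (hy : 1 ≤ y) (hxy : x ≤ y) (a t : Int)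
    (ha : a = 2 * t) (ht : 1 ≤ t) (hx : (x : Int) < t) (hyt : (y : Int) = t → x = 0)
    (hn : (2 * a - x - y).toNat ≤ n) :
    checkTriples a ((x : Int) :: (y : Int) :: fibBuild a [] x y hy hxy)
      = ((fibSearch t x y hy hxy : Int) == t) := by
  induction n generalizing x y with
  | zero =>
      -- measure 0 forces y ≥ a > t: list ends, fibSearch returns y ≠ t
      have hya : ¬ ((y : Int) < a) := by omega
      have hne : ¬ ((y : Int) = t) := by omega
      rw [fibBuild_step a [] x y, fibSearch_step]
      have hyt' : ¬ ((y : Int) < t) := by omega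
      simp [checkTriples, hya, hyt', hne]
  | succ n ih =>
      rw [fibSearch_step]
      by_cases hlt : (y : Int) < t
      · -- y < t < a: the list continues
        have hya : (y : Int) < a := by omega
        rw [fibBuild_step a [] x y]
        simp only [hya, dite_true, hlt, dite_true]
        rw [fibBuild_append n a y (x + y) (by omega) (by omega) _ (by omega)]
        simp only [List.nil_append, List.singleton_append]
        rw [checkTriples]
        by_cases hsum : ((x : Int) + (y : Int) + ((x + y : Nat) : Int) = a)
        · -- triple (x, y, x+y) matches: x + y = t, so fibSearch stops at x+y = t
          have hxyt : ((x + y : Nat) : Int) = t := by push_cast at hsum ⊢; omega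
          rw [fibSearch_step]
          have hstop : ¬ (((x + y : Nat) : Int) < t) := by omega
          simp only [hstop, dite_false]
          simp [checkTriples, hxyt]
          exact Or.inl (by omega)
        · simp only [hsum, if_false]
          rw [ih y (x + y) (by omega) (by omega) hlt
            (by intro hc; exact absurd (by push_cast at hc ⊢; omega) hsum)
            (by omega)]
      · -- y ≥ t: fibSearch returns y
        simp only [hlt, dite_false]
        by_cases heq : (y : Int) = t
        · -- y = t forces x = 0 (only the initial state): triple (0, t, t) matches
          have hx0 : x = 0 := hyt heq
          subst hx0
          have hya : (y : Int) < a := by omega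
          rw [fibBuild_step a [] 0 y]
          simp only [hya, dite_true]
          rw [fibBuild_append n a y (0 + y) (by omega) (by omega) _ (by omega)]
          simp only [List.nil_append, List.singleton_append]
          rw [checkTriples]
          have hsum : ((0 : Nat) : Int) + (y : Int) + ((0 + y : Nat) : Int) = a := by
            push_cast; omega
          simp only [checkTriples, hsum, if_true]
          simp [heq]
        · -- t < y: no triple can match any more
          by_cases hya : (y : Int) < a
          · rw [fibBuild_step a [] x y]
            simp only [hya, dite_true]
            rw [fibBuild_append n a y (x + y) (by omega) (by omega) _ (by omega)]
            simp only [List.nil_append, List.singleton_append]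
            rw [checkTriples]
            have hne : ¬ ((x : Int) + (y : Int) + ((x + y : Nat) : Int) = a) := by
              push_cast; omega
            simp only [hne, if_false]
            rw [checkTriples_past n y (x + y) (by omega) (by omega) a t ha (by push_cast; omega) (by omega)]
            simp [heq]
          · rw [fibBuild_step a [] x y]
            simp [checkTriples, hya, heq]

-- ===== VERDICT (by name: the statement is the Claim_ definition above) =====
theorem sum_elements_fibonacci_spec : Claim_equal_sum_elements_fibonacci := by
  intro a _
  unfold Spec_sum_elements_fibonacci sum_elements_fibonacci sum_elements_fibonacci_alt
  have h01 : ∀ (hy : 1 ≤ 1) (hxy : 0 ≤ 1), ([0, 1] : List Int) ++ fibBuild a [] 0 1 hy hxy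
      = ((0 : Nat) : Int) :: ((1 : Nat) : Int) :: fibBuild a [] 0 1 hy hxy := by
    simp
  by_cases hpos : a ≤ 0
  · -- list stays [0, 1]: no triple
    rw [fibBuild_append (2 * a - 0 - 1).toNat a 0 1 (by omega) (by omega) _ (by omega)]
    rw [fibBuild_step a [] 0 1]
    simp [checkTriples, show ¬ ((1 : Int) < a) by omega, hpos]
  · have hmod : PySem.Int.mod a 2 = a % 2 := PySem.Int.mod_eq_emod_of_pos (by omega)
    by_cases hodd : a % 2 = 1
    · -- odd a: both sides false
      rw [fibBuild_append (2 * a - 0 - 1).toNat a 0 1 (by omega) (by omega) _ (by omega), h01]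
      rw [checkTriples_odd (2 * a - 0 - 1).toNat 0 1 (by omega) (by omega) a hodd (by omega)]
      simp [hmod, hodd, hpos]
    · -- positive even a: a = 2 * t with t = a // 2 ≥ 1
      have hdiv : PySem.Int.floordiv a 2 = a / 2 := PySem.Int.floordiv_eq_ediv_of_pos (by omega)
      have hemod : a % 2 = 0 := by omega
      set t : Int := a / 2 with htdef
      have hat : a = 2 * t := by omega
      have ht1 : 1 ≤ t := by omega
      rw [fibBuild_append (2 * a - 0 - 1).toNat a 0 1 (by omega) (by omega) _ (by omega), h01]
      rw [main_lemma (2 * a - 0 - 1).toNat 0 1 (by omega) (by omega) a t hat ht1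
        (by push_cast; omega) (fun _ => rfl) (by omega)]
      simp [hmod, hemod, hdiv, hpos]
      exact Iff.rfl
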